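-- pv_equiv track=rewrite | github.com/dstarner/venture-coach-scheduler | lib/time.py | flatten_time_array
-- ===== SOURCE A (Python) =====
-- def flatten_time_array(time_array):
--     interval_times = []
--     skip_next = False
--     for i, event in enumerate(time_array):
--         if not skip_next:
--             interval_times.append(event["start"])
--         skip_next = False
--
--         if len(time_array) > i+1 and event["end"] > time_array[i+1]["start"]:
--             skip_next = True
--         else:
--             interval_times.append(event["end"])
--
--     return interval_times
-- ===== SOURCE B (Python) =====
-- def flatten_time_array(time_array):
--     merged = []
--     for event in time_array:
--         if merged and merged[-1][1] > event["start"]: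
--             merged[-1][1] = event["end"]
--         else:
--             merged.append([event["start"], event["end"]])
--     result = []
--     for s, e in merged:
--         result.append(s)
--         result.append(e)
--     return result
-- ===== Notes on version B (the rewrite author's own statement) =====
-- stated objective: alternative
-- what changed: Replaces A's stateful skip_next look-ahead flag over enumerate with a two-phase algorithm: first build an explicit merged-intervals table, then flatten it into the result list.
import Mathlib
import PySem

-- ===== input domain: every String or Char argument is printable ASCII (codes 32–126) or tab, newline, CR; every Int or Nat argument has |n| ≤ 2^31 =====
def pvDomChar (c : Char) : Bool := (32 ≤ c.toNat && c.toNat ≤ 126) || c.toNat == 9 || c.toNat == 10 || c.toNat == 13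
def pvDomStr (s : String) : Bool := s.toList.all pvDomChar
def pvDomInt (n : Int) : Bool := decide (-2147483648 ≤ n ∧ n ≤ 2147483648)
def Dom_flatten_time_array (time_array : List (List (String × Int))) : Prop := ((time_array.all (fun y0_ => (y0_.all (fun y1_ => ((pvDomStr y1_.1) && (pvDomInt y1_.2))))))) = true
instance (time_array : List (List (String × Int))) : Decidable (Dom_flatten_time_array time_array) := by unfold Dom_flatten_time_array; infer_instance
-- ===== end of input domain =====

-- B replaces A's stateful skip_next look-ahead flag with an explicit merged-intervals table that is then flattened (alternative decomposition, same cost).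


-- ===== PORT A =====
-- event[k]: Python dict lookup (first match); a missing key is a KeyError, excluded by Pre_
def pvEvGet (ev : List (String × Int)) (k : String) : Int := (PySem.Dict.mk ev).getD k 0

def flatten_time_array (time_array : List (List (String × Int))) : List Int :=
  ((PySem.List.enumerate time_array 0).foldl
    (fun (st : List Int × Bool) (p : Int × List (String × Int)) =>
      let interval_times := if st.2 = false then st.1 ++ [pvEvGet p.2 "start"] else st.1
      if decide ((time_array.length : Int) > p.1 + 1) &&
         decide (pvEvGet p.2 "end" > pvEvGet ((PySem.List.pyGet? time_array (p.1 + 1)).getD []) "start")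
      then (interval_times, true)
      else (interval_times ++ [pvEvGet p.2 "end"], false))
    ([], false)).1

-- ===== PORT B =====
-- merged is kept most-recent-first (Python appends at the end and mutates merged[-1]); reverse restores order
def flatten_time_array_alt (time_array : List (List (String × Int))) : List Int :=
  let merged := time_array.foldl
    (fun (acc : List (Int × Int)) ev =>
      match acc with
      | last :: rest =>
          if last.2 > pvEvGet ev "start" then (last.1, pvEvGet ev "end") :: rest
          else (pvEvGet ev "start", pvEvGet ev "end") :: last :: rest
      | [] => [(pvEvGet ev "start", pvEvGet ev "end")]) []
  merged.reverse.foldl (fun (r : List Int) p => r ++ [p.1, p.2]) []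

-- ===== PRECONDITION & SPEC =====
-- Pre_ excludes exactly the inputs where Python A raises KeyError: an event missing the "start" or "end" key.
def Pre_flatten_time_array (time_array : List (List (String × Int))) : Prop :=
  (time_array.all (fun ev => (PySem.Dict.mk ev).contains "start" && (PySem.Dict.mk ev).contains "end")) = true
instance (time_array : List (List (String × Int))) : Decidable (Pre_flatten_time_array time_array) := by unfold Pre_flatten_time_array; infer_instance
def pvWitness_flatten_time_array : (List (List (String × Int))) := [[("start", 0), ("end", 2)], [("start", 1), ("end", 3)]]

def Spec_flatten_time_array (time_array : List (List (String × Int))) (out : List Int) : Prop := out = flatten_time_array_alt time_array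
instance (time_array : List (List (String × Int))) (out : List Int) : Decidable (Spec_flatten_time_array time_array out) := by unfold Spec_flatten_time_array; infer_instance

-- ===== CLAIM (what is proved, stated in full; the proofs are below) =====
def Claim_equal_flatten_time_array : Prop := ∀ (time_array : List (List (String × Int))), Dom_flatten_time_array time_array → Pre_flatten_time_array time_array → Spec_flatten_time_array time_array (flatten_time_array time_array)

-- ===== LEMMAS AND PROOFS =====

-- named forms of the two fold bodies (definitionally equal to the lambdas in the ports)
def pvStepA (ta : List (List (String × Int))) (st : List Int × Bool) (p : Int × List (String × Int)) : List Int × Bool :=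
  let interval_times := if st.2 = false then st.1 ++ [pvEvGet p.2 "start"] else st.1
  if decide ((ta.length : Int) > p.1 + 1) &&
     decide (pvEvGet p.2 "end" > pvEvGet ((PySem.List.pyGet? ta (p.1 + 1)).getD []) "start")
  then (interval_times, true)
  else (interval_times ++ [pvEvGet p.2 "end"], false)

def pvStepB (acc : List (Int × Int)) (ev : List (String × Int)) : List (Int × Int) :=
  match acc with
  | last :: rest =>
      if last.2 > pvEvGet ev "start" then (last.1, pvEvGet ev "end") :: rest
      else (pvEvGet ev "start", pvEvGet ev "end") :: last :: rest
  | [] => [(pvEvGet ev "start", pvEvGet ev "end")]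

-- The common core both programs compute: the tail of the flattened output after an
-- open interval with end `e`, scanning the remaining events.
def pvU (e : Int) : List (List (String × Int)) → List Int
  | [] => [e]
  | ev :: rest =>
      if e > pvEvGet ev "start" then pvU (pvEvGet ev "end") rest
      else e :: pvEvGet ev "start" :: pvU (pvEvGet ev "end") rest

-- in-order merged-intervals table with open interval (s, e)
def pvMergeRec (s e : Int) : List (List (String × Int)) → List (Int × Int)
  | [] => [(s, e)]
  | ev :: rest =>
      if e > pvEvGet ev "start" then pvMergeRec s (pvEvGet ev "end") rest
      else (s, e) :: pvMergeRec (pvEvGet ev "start") (pvEvGet ev "end") rest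

def pvTail (l : List (List (String × Int))) (skip : Bool) : List Int :=
  match l with
  | [] => []
  | ev :: rest => (if skip then [] else [pvEvGet ev "start"]) ++ pvU (pvEvGet ev "end") rest

lemma bridgeA (ta : List (List (String × Int))) :
    ∀ (l pre : List (List (String × Int))) (acc : List Int) (skip : Bool), ta = pre ++ l →
    ((PySem.List.enumerate l (pre.length : Int)).foldl (pvStepA ta) (acc, skip)).1
      = acc ++ pvTail l skip := by
  intro l
  induction l with
  | nil => intro pre acc skip h; simp [PySem.List.enumerate_nil, pvTail]
  | cons ev rest ih =>
    intro pre acc skip h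
    rw [PySem.List.enumerate_cons, List.foldl_cons]
    have hget : PySem.List.pyGet? ta ((pre.length : Int) + 1) = (ta.drop (pre.length + 1)).head? := by
      have : ((pre.length : Int) + 1) = ((pre.length + 1 : Nat) : Int) := by push_cast; ring
      rw [this, PySem.List.pyGet?_natCast]
      simp [List.head?_eq_getElem?, List.getElem?_drop]
    have hdrop : ta.drop (pre.length + 1) = rest := by
      subst h
      rw [show pre.length + 1 = (pre ++ [ev]).length by simp]
      rw [show pre ++ ev :: rest = (pre ++ [ev]) ++ rest by simp]
      exact List.drop_left
    have hlen : ta.length = pre.length + 1 + rest.length := by subst h; simp; omega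
    cases rest with
    | nil =>
      have hstep : pvStepA ta (acc, skip) ((pre.length : Int), ev)
          = ((if skip = false then acc ++ [pvEvGet ev "start"] else acc) ++ [pvEvGet ev "end"], false) := by
        have hc : decide ((ta.length : Int) > (pre.length : Int) + 1) = false := by simp [hlen]
        simp [pvStepA, hc]
      rw [hstep, PySem.List.enumerate_nil]
      simp only [List.foldl_nil]
      cases skip <;> simp [pvTail, pvU]
    | cons nxt tl =>
      have hc : decide ((ta.length : Int) > (pre.length : Int) + 1) = true := by
        have hgt : (ta.length : Int) > (pre.length : Int) + 1 := by rw [hlen]; push_cast [List.length_cons]; omega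
        simpa using hgt
      have hnx : (PySem.List.pyGet? ta ((pre.length : Int) + 1)).getD [] = nxt := by
        rw [hget, hdrop]; rfl
      have hlen1 : (pre.length : Int) + 1 = (((pre ++ [ev]).length : Nat) : Int) := by simp
      by_cases hov : pvEvGet ev "end" > pvEvGet nxt "start"
      · have hstep : pvStepA ta (acc, skip) ((pre.length : Int), ev)
            = ((if skip = false then acc ++ [pvEvGet ev "start"] else acc), true) := by
          simp [pvStepA, hc, hnx, hov]
        rw [hstep, hlen1, ih (pre ++ [ev]) _ true (by simp [h])]
        cases skip <;> simp [pvTail, pvU, hov]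
      · have hstep : pvStepA ta (acc, skip) ((pre.length : Int), ev)
            = ((if skip = false then acc ++ [pvEvGet ev "start"] else acc) ++ [pvEvGet ev "end"], false) := by
          simp [pvStepA, hc, hnx, hov]
        rw [hstep, hlen1, ih (pre ++ [ev]) _ false (by simp [h])]
        cases skip <;> simp [pvTail, pvU, hov]

lemma mergeFoldB : ∀ (l : List (List (String × Int))) (s e : Int) (rest : List (Int × Int)),
    l.foldl pvStepB ((s, e) :: rest) = (pvMergeRec s e l).reverse ++ rest := by
  intro l
  induction l with
  | nil => intro s e rest; simp [pvMergeRec]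
  | cons ev tl ih =>
    intro s e rest
    rw [List.foldl_cons]
    by_cases hov : e > pvEvGet ev "start"
    · rw [show pvStepB ((s, e) :: rest) ev = (s, pvEvGet ev "end") :: rest from by simp [pvStepB, hov]]
      rw [ih, pvMergeRec]; simp [hov]
    · rw [show pvStepB ((s, e) :: rest) ev = (pvEvGet ev "start", pvEvGet ev "end") :: (s, e) :: rest from by simp [pvStepB, hov]]
      rw [ih, pvMergeRec]; simp [hov]

lemma flatMergeRec : ∀ (l : List (List (String × Int))) (s e : Int) (r0 : List Int),
    (pvMergeRec s e l).foldl (fun (r : List Int) p => r ++ [p.1, p.2]) r0 = r0 ++ s :: pvU e l := by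
  intro l
  induction l with
  | nil => intro s e r0; simp [pvMergeRec, pvU]
  | cons ev tl ih =>
    intro s e r0
    rw [pvMergeRec]
    by_cases hov : e > pvEvGet ev "start"
    · simp only [hov, if_true]
      rw [ih, pvU]; simp [hov]
    · simp only [hov, if_false]
      rw [List.foldl_cons, ih, pvU]; simp [hov]

lemma altEq (ta : List (List (String × Int))) : flatten_time_array_alt ta = pvTail ta false := by
  cases ta with
  | nil => rfl
  | cons ev rest =>
    show (((ev :: rest).foldl pvStepB []).reverse.foldl (fun (r : List Int) p => r ++ [p.1, p.2]) []) = _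
    rw [List.foldl_cons]
    rw [show pvStepB [] ev = [(pvEvGet ev "start", pvEvGet ev "end")] from rfl]
    rw [mergeFoldB rest (pvEvGet ev "start") (pvEvGet ev "end") []]
    rw [List.append_nil, List.reverse_reverse, flatMergeRec]
    simp [pvTail]

-- ===== VERDICT (by name: the statement is the Claim_ definition above) =====
theorem flatten_time_array_spec : Claim_equal_flatten_time_array := by
  intro ta _ _
  show flatten_time_array ta = flatten_time_array_alt ta
  rw [altEq]
  have := bridgeA ta ta [] [] false (by simp)
  simpa using this
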